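-- pv_equiv track=rewrite | github.com/ukatc/fpu_driver | python/fpu_commands.py | step_list_count
-- ===== SOURCE A (Python) =====
-- def step_list_count(slist):
--     # Count the number of steps moved by a particular step list
--     # and return the count plus the maximum change between elements.
--     nsteps = 0
--     maxchange = 0
--     laststep = 0
--     for step in slist:
--         nsteps += step
--         if abs(step-laststep) > maxchange:
--             maxchange = abs(step-laststep)
--         laststep = step
--     return (nsteps, maxchange)
-- ===== SOURCE B (Python) =====
-- def step_list_count(slist):
--     # Divide-and-conquer: over lst = [0] + list(slist) (the 0 plays the role of
--     # the initial reference step), each segment lst[lo:hi] yields the summary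
--     # (segment sum, max adjacent |difference| inside the segment); two halves
--     # combine by also taking the |difference| across the midpoint boundary.
--     lst = [0] + list(slist)
--     def solve(lo, hi):
--         if hi - lo <= 1:
--             return (lst[lo], 0)
--         mid = (lo + hi) // 2
--         s1, m1 = solve(lo, mid)
--         s2, m2 = solve(mid, hi)
--         return (s1 + s2, max(m1, m2, abs(lst[mid] - lst[mid - 1])))
--     return solve(0, len(lst))
-- ===== Notes on version B (the rewrite author's own statement) =====
-- stated objective: alternative
-- what changed: Replaces A's single fused left-to-right loop carrying (nsteps, maxchange, laststep) state with a recursive divide-and-conquer over index segments of the list with a zero prepended: each half returns a (sum, max adjacent absolute difference) summary and halves merge with the boundary difference.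
import Mathlib
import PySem

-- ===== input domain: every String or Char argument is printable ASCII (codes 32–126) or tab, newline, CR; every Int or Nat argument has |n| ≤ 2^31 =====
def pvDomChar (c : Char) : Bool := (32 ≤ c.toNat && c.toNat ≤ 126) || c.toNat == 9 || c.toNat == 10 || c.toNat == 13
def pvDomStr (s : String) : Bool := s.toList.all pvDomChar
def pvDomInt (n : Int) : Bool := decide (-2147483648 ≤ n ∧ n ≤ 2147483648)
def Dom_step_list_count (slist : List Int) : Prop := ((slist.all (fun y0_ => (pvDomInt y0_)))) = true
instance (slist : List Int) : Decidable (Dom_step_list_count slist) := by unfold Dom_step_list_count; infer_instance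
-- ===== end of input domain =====

-- B replaces A's fused stateful loop with a divide-and-conquer over index segments, merging (sum, max adjacent |diff|) summaries at the midpoint: a different algorithm of the same cost.


-- ===== PORT A =====
-- one fused loop over (nsteps, maxchange, laststep)
def step_list_count (slist : List Int) : Int × Int :=
  let st := slist.foldl
    (fun (acc : Int × Int × Int) step =>
      let nsteps := acc.1 + step
      let maxchange := if |step - acc.2.2| > acc.2.1 then |step - acc.2.2| else acc.2.1
      (nsteps, maxchange, step))
    (0, 0, 0)
  (st.1, st.2.1)

-- ===== PORT B =====
-- recursive segment solver over lst[lo:hi] (indices always in range from the top call,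
-- so Python's lst[i] is exactly List.getD here)
def slcSolve (lst : List Int) (lo hi : Nat) : Int × Int :=
  if hi - lo ≤ 1 then
    (lst.getD lo 0, 0)
  else
    let mid := (lo + hi) / 2
    let p1 := slcSolve lst lo mid
    let p2 := slcSolve lst mid hi
    (p1.1 + p2.1, max (max p1.2 p2.2) |lst.getD mid 0 - lst.getD (mid - 1) 0|)
termination_by hi - lo
decreasing_by all_goals omega

def step_list_count_alt (slist : List Int) : Int × Int :=
  let lst := 0 :: slist
  slcSolve lst 0 lst.length

-- ===== PRECONDITION & SPEC =====
def Spec_step_list_count (slist : List Int) (out : Int × Int) : Prop := out = step_list_count_alt slist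
instance (slist : List Int) (out : Int × Int) : Decidable (Spec_step_list_count slist out) := by unfold Spec_step_list_count; infer_instance

-- ===== CLAIM (what is proved, stated in full; the proofs are below) =====
def Claim_equal_step_list_count : Prop := ∀ (slist : List Int), Dom_step_list_count slist → Spec_step_list_count slist (step_list_count slist)

-- ===== LEMMAS AND PROOFS =====

-- the absolute adjacent differences of a list
def adjPairs (xs : List Int) : List Int := (xs.zip xs.tail).map (fun p => |p.2 - p.1|)

theorem slc_getLast?_cons_getD (b : Int) (u : List Int) (x : Int) :
    ((b :: u).getLast?).getD x = (b :: u).getLast (by simp) := by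
  simp [List.getLast?_eq_some_getLast]

-- A's fold computes (sum, adjacent-diff max of last::l, last element)
theorem slc_fold_inv (l : List Int) (n m last : Int) :
    l.foldl
      (fun (acc : Int × Int × Int) step =>
        let nsteps := acc.1 + step
        let maxchange := if |step - acc.2.2| > acc.2.1 then |step - acc.2.2| else acc.2.1
        (nsteps, maxchange, step))
      (n, m, last)
    = (n + l.sum,
       (adjPairs (last :: l)).foldl max m,
       (l.getLast?).getD last) := by
  induction l generalizing n m last with
  | nil => simp [adjPairs]
  | cons a t ih =>
    simp only [List.foldl_cons, adjPairs, List.tail_cons, List.zip_cons_cons,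
      List.map_cons, List.sum_cons]
    rw [ih]
    refine Prod.ext ?_ (Prod.ext ?_ ?_)
    · simp; ring
    · simp only [adjPairs, List.tail_cons]
      congr 1
      rcases le_or_gt (|a - last|) m with h | h
      · simp [not_lt.mpr h, max_eq_left h]
      · simp [h, max_eq_right (le_of_lt h)]
    · cases t with
      | nil => simp
      | cons b u => simp [slc_getLast?_cons_getD]

theorem slc_foldl_max_shift (l : List Int) (a b : Int) :
    l.foldl max (max a b) = max a (l.foldl max b) := by
  induction l generalizing a b with
  | nil => rfl
  | cons c t ih =>
    simp only [List.foldl_cons]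
    rw [max_assoc, ih]

theorem slc_adjPairs_append (x : Int) (xs : List Int) (y : Int) (ys : List Int) :
    adjPairs ((x :: xs) ++ (y :: ys))
      = adjPairs (x :: xs) ++ (|y - (x :: xs).getLast (by simp)| :: adjPairs (y :: ys)) := by
  induction xs generalizing x with
  | nil => simp [adjPairs]
  | cons a t ih =>
    have h := ih a
    simp only [adjPairs, List.cons_append, List.tail_cons, List.zip_cons_cons,
      List.map_cons] at h ⊢
    rw [h]
    simp [List.getLast]

theorem slc_foldl_max_append (P1 P2 : List Int) (d : Int) (hd : 0 ≤ d) :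
    (P1 ++ d :: P2).foldl max 0
      = max (max (P1.foldl max 0) (P2.foldl max 0)) d := by
  rw [List.foldl_append, List.foldl_cons]
  have h1 : P2.foldl max (max (P1.foldl max 0) d)
      = max (P1.foldl max 0) (P2.foldl max d) := slc_foldl_max_shift _ _ _
  have h2 : P2.foldl max d = max d (P2.foldl max 0) := by
    have := slc_foldl_max_shift P2 d 0
    rwa [max_eq_left hd] at this
  rw [h1, h2, max_comm d (P2.foldl max 0), ← max_assoc]

-- on a valid segment, the solver returns (segment sum, max adjacent |diff| of the segment)
theorem slc_adjPairs_append' (xs ys : List Int) (hx : xs ≠ []) (hy : ys ≠ []) :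
    adjPairs (xs ++ ys) = adjPairs xs ++ (|ys.head hy - xs.getLast hx| :: adjPairs ys) := by
  cases xs with
  | nil => exact absurd rfl hx
  | cons x t =>
    cases ys with
    | nil => exact absurd rfl hy
    | cons y u => exact slc_adjPairs_append x t y u

theorem slcSolve_eq (lst : List Int) : ∀ (lo hi : Nat), lo < hi → hi ≤ lst.length →
    slcSolve lst lo hi
      = (((lst.drop lo).take (hi - lo)).sum,
         (adjPairs ((lst.drop lo).take (hi - lo))).foldl max 0) := by
  intro lo hi
  induction lo, hi using slcSolve.induct lst with
  | case1 lo hi h =>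
    intro hlo hhi
    have hhi1 : hi = lo + 1 := by omega
    subst hhi1
    have hlt : lo < lst.length := by omega
    rw [slcSolve]
    simp only [Nat.add_sub_cancel_left]
    have ht : (lst.drop lo).take 1 = [lst[lo]] := by
      rw [List.drop_eq_getElem_cons hlt, List.take_succ_cons, List.take_zero]
    rw [ht]
    simp [adjPairs, List.getD, List.getElem?_eq_getElem hlt]
  | case2 lo hi h mid ih1 ih2 =>
    intro hlo hhi
    simp only at ih1 ih2
    have hmid1 : lo < (lo + hi) / 2 := by omega
    have hmid2 : (lo + hi) / 2 < hi := by omega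
    rw [slcSolve, if_neg h]
    simp only
    rw [ih1 hmid1 (by omega), ih2 hmid2 hhi]
    have hmlt : (lo + hi) / 2 < lst.length := by omega
    have hseg : (lst.drop lo).take (hi - lo)
        = ((lst.drop lo).take ((lo + hi) / 2 - lo))
          ++ ((lst.drop ((lo + hi) / 2)).take (hi - (lo + hi) / 2)) := by
      have harith : hi - lo = ((lo + hi) / 2 - lo) + (hi - (lo + hi) / 2) := by omega
      rw [harith, List.take_add, List.drop_drop,
        (by omega : lo + ((lo + hi) / 2 - lo) = (lo + hi) / 2)]
    have hl1 : ((lst.drop lo).take ((lo + hi) / 2 - lo)).length = (lo + hi) / 2 - lo := by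
      simp [List.length_take, List.length_drop]; omega
    have hl2 : ((lst.drop ((lo + hi) / 2)).take (hi - (lo + hi) / 2)).length
        = hi - (lo + hi) / 2 := by
      simp [List.length_take, List.length_drop]; omega
    have hx : (lst.drop lo).take ((lo + hi) / 2 - lo) ≠ [] := by
      intro hc; rw [hc] at hl1; simp at hl1; omega
    have hy : (lst.drop ((lo + hi) / 2)).take (hi - (lo + hi) / 2) ≠ [] := by
      intro hc; rw [hc] at hl2; simp at hl2; omega
    rw [hseg, List.sum_append, slc_adjPairs_append' _ _ hx hy,
      slc_foldl_max_append _ _ _ (abs_nonneg _)]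
    have hhead : ((lst.drop ((lo + hi) / 2)).take (hi - (lo + hi) / 2)).head hy
        = lst.getD ((lo + hi) / 2) 0 := by
      rw [List.head_eq_getElem, List.getElem_take, List.getElem_drop,
        List.getD_eq_getElem lst 0 (by omega)]
      simp
    have hlast : ((lst.drop lo).take ((lo + hi) / 2 - lo)).getLast hx
        = lst.getD ((lo + hi) / 2 - 1) 0 := by
      rw [List.getLast_eq_getElem, List.getElem_take, List.getElem_drop,
        List.getD_eq_getElem lst 0 (by omega)]
      congr 1; rw [hl1]; omega
    rw [hhead, hlast]

-- ===== VERDICT (by name: the statement is the Claim_ definition above) =====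
theorem step_list_count_spec : Claim_equal_step_list_count := by
  intro slist _
  unfold Spec_step_list_count step_list_count step_list_count_alt
  simp only [slc_fold_inv, Int.zero_add]
  rw [slcSolve_eq (0 :: slist) 0 (0 :: slist).length (by simp) le_rfl]
  simp
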